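-- pv_equiv track=rewrite | github.com/LuoH-AN/Telegram-AI-Bot | ai/openai_client.py | _role_summary
-- ===== SOURCE A (Python) =====
-- def _role_summary(messages: list[dict]) -> str:
--     """Build a role count summary like 'assistant:2,system:1,user:3'."""
--     counts: dict[str, int] = {}
--     for message in messages:
--         role = "unknown"
--         if isinstance(message, dict):
--             role = str(message.get("role", "unknown"))
--         counts[role] = counts.get(role, 0) + 1
--     return ",".join(f"{role}:{counts[role]}" for role in sorted(counts)) if counts else "-"
-- ===== SOURCE B (Python) =====
-- from itertools import groupby
--
--
-- def _role_summary(messages: list[dict]) -> str: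
--     """Build a role count summary like 'assistant:2,system:1,user:3'."""
--     roles = sorted(
--         "unknown" if not isinstance(m, dict) else str(m.get("role", "unknown"))
--         for m in messages
--     )
--     parts = [f"{role}:{len(list(group))}" for role, group in groupby(roles)]
--     return ",".join(parts) if parts else "-"
-- ===== Notes on version B (the rewrite author's own statement) =====
-- stated objective: alternative
-- what changed: Replaces the hash-count dict plus sorted-keys pass with mapping each message to its role, sorting the role list once, and run-length encoding consecutive equal roles (itertools.groupby) to emit role:count pairs already in sorted order.
import Mathlib
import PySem

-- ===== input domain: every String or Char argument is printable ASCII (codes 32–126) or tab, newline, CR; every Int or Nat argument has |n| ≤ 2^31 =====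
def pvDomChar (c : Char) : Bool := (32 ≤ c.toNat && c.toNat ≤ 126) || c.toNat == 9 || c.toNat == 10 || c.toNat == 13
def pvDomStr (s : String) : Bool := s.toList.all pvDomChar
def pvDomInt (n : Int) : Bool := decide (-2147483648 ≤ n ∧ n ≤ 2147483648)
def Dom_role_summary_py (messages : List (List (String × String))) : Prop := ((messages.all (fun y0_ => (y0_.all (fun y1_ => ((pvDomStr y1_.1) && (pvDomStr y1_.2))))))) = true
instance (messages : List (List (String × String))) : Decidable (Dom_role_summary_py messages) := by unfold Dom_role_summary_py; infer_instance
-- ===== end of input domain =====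

-- B maps each message to its role, sorts the role list once and run-length-encodes consecutive
-- equal roles (itertools.groupby), instead of A's dict counting followed by sorting the keys.

-- ===== PORT A =====
-- counts[role] = counts.get(role, 0) + 1 over the messages, then ",".join over sorted(counts);
-- str(message.get("role","unknown")) is the identity here since all dict values are strings.
def role_summary_py (messages : List (List (String × String))) : String :=
  let counts : PySem.Dict String Int :=
    messages.foldl (fun d m =>
      let role := (PySem.Dict.mk m).getD "role" "unknown"
      d.insert role (d.getD role 0 + 1)) PySem.Dict.empty
  if counts.size ≠ 0 then
    PySem.Str.join ","
      ((PySem.List.sorted counts.keys (fun r => r) false).map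
        (fun role => role ++ ":" ++ PySem.Int.toStr (counts.getD role 0)))
  else "-"

-- ===== PORT B =====
-- itertools.groupby over a list = run-length encoding of consecutive equal elements
def pvRle (l : List String) : List (String × Nat) :=
  match l with
  | [] => []
  | x :: xs => (x, (xs.takeWhile (· == x)).length + 1) :: pvRle (xs.dropWhile (· == x))
termination_by l.length
decreasing_by
  simp only [List.length_cons]
  exact Nat.lt_succ_of_le (List.length_dropWhile_le _ _)

def role_summary_py_alt (messages : List (List (String × String))) : String :=
  let roles := PySem.List.sorted
    (messages.map (fun m => (PySem.Dict.mk m).getD "role" "unknown")) (fun r => r) false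
  let parts := (pvRle roles).map (fun p => p.1 ++ ":" ++ PySem.Int.toStr (p.2 : Int))
  if parts ≠ [] then PySem.Str.join "," parts else "-"

-- ===== PRECONDITION & SPEC =====
def Spec_role_summary_py (messages : List (List (String × String))) (out : String) : Prop := out = role_summary_py_alt messages
instance (messages : List (List (String × String))) (out : String) : Decidable (Spec_role_summary_py messages out) := by unfold Spec_role_summary_py; infer_instance

-- ===== CLAIM (what is proved, stated in full; the proofs are below) =====
def Claim_equal_role_summary_py : Prop := ∀ (messages : List (List (String × String))), Dom_role_summary_py messages → Spec_role_summary_py messages (role_summary_py messages)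

-- ===== LEMMAS AND PROOFS =====

theorem upd_mem (t s : List String) (h : ∀ y ∈ t, y ∈ s) : PySem.Set.update s t = s := by
  induction t generalizing s with
  | nil => rfl
  | cons y t ih =>
    simp only [PySem.Set.update, List.foldl_cons] at *
    have hy : PySem.Set.add s y = s := by
      simp [PySem.Set.add, PySem.Set.contains, h y (by simp)]
    rw [hy]
    exact ih s (fun z hz => h z (by simp [hz]))

theorem upd_cons (t : List String) (x : String) (s : List String) (h : x ∉ t) :
    PySem.Set.update (x :: s) t = x :: PySem.Set.update s t := by
  induction t generalizing s with
  | nil => rfl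
  | cons y t ih =>
    simp only [PySem.Set.update, List.foldl_cons] at *
    have hyx : y ≠ x := fun e => h (by simp [e])
    have hadd : PySem.Set.add (x :: s) y = x :: PySem.Set.add s y := by
      simp [PySem.Set.add, PySem.Set.contains, hyx]
      split <;> simp
    rw [hadd]
    exact ih _ (fun hy => h (by simp [hy]))

theorem pvKey (l : List String) (h : l.Pairwise (· ≤ ·)) :
    pvRle l = (PySem.Set.ofList l).map (fun r => (r, l.count r)) ∧
      (PySem.Set.ofList l).Pairwise (· < ·) := by
  induction l using pvRle.induct with
  | case1 => simp [pvRle]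
  | case2 x xs ih =>
    rw [List.pairwise_cons] at h
    obtain ⟨hxle, hxs⟩ := h
    set run := xs.takeWhile (· == x) with hrundef
    set rest := xs.dropWhile (· == x) with hrestdef
    have hsplit : run ++ rest = xs := List.takeWhile_append_dropWhile
    have hrun : ∀ y ∈ run, y = x := fun y hy => by
      have := List.mem_takeWhile_imp hy; simpa using this
    have hrest_sorted : rest.Pairwise (· ≤ ·) :=
      List.Pairwise.sublist (List.dropWhile_sublist _) hxs
    have hxlt : ∀ y ∈ rest, x < y := by
      match hr : rest with
      | [] => intro y hy; simp at hy
      | y0 :: t =>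
        have hy0 : ¬ ((y0 == x) = true) := by
          have := List.head?_dropWhile_not (· == x) xs
          rw [← hrestdef] at this
          simpa using this
        have hy0x : x < y0 := by
          have hle : x ≤ y0 := hxle y0 (by rw [← hsplit]; simp)
          rcases lt_or_eq_of_le hle with h | h
          · exact h
          · exact absurd (beq_iff_eq.mpr h.symm) hy0
        intro y hy
        rcases (List.mem_cons).1 hy with rfl | hyt
        · exact hy0x
        · rw [List.pairwise_cons] at hrest_sorted
          exact lt_of_lt_of_le hy0x (hrest_sorted.1 y hyt)
    have hxnot : x ∉ rest := fun hc => lt_irrefl x (hxlt x hc)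
    have hofl : PySem.Set.ofList (x :: xs) = x :: PySem.Set.ofList rest := by
      have h1 : PySem.Set.ofList (x :: xs) = PySem.Set.update [x] xs := rfl
      rw [h1, ← hsplit]
      have h2 : PySem.Set.update [x] (run ++ rest)
          = PySem.Set.update (PySem.Set.update [x] run) rest := by
        simp [PySem.Set.update, List.foldl_append]
      rw [h2, upd_mem run [x] (fun y hy => by simp [hrun y hy]), upd_cons rest x [] hxnot]
      rfl
    obtain ⟨ih1, ih2⟩ := ih hrest_sorted
    refine ⟨?_, ?_⟩
    · rw [pvRle, hofl, List.map_cons, ih1]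
      congr 1
      · -- head pair
        have hcx : (x :: xs).count x = run.length + 1 := by
          rw [List.count_cons_self, ← hsplit, List.count_append]
          have h1 : run.count x = run.length := by
            rw [List.count_eq_length]; intro b hb; exact (hrun b hb).symm
          have h2 : rest.count x = 0 := List.count_eq_zero.2 hxnot
          omega
        rw [hcx, ← hrundef]
      · apply List.map_congr_left
        intro r hr
        have hrrest : r ∈ rest := by
          have := (PySem.Set.mem_ofList rest r).1 hr
          exact this
        have hrx : r ≠ x := fun e => lt_irrefl x (e ▸ hxlt r hrrest)
        have : (x :: xs).count r = rest.count r := by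
          rw [List.count_cons_of_ne hrx.symm, ← hsplit, List.count_append]
          have h1 : run.count r = 0 := by
            rw [List.count_eq_zero]; intro hc; exact hrx (hrun r hc)
          omega
        simp [this]
    · rw [hofl, List.pairwise_cons]
      exact ⟨fun y hy => hxlt y ((PySem.Set.mem_ofList rest y).1 hy), ih2⟩

theorem main_eq (messages : List (List (String × String))) :
    role_summary_py messages = role_summary_py_alt messages := by
  unfold role_summary_py role_summary_py_alt
  set roleOf : List (String × String) → String :=
    fun m => (PySem.Dict.mk m).getD "role" "unknown" with hroleOf
  set rs : List String := messages.map roleOf with hrs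
  have hfold : messages.foldl (fun d m =>
      d.insert (roleOf m) (d.getD (roleOf m) 0 + 1)) (PySem.Dict.empty : PySem.Dict String Int)
      = rs.foldl (fun d r => d.insert r (d.getD r 0 + 1)) PySem.Dict.empty := by
    rw [hrs, List.foldl_map]
  simp only []
  rw [hfold]
  set counts := rs.foldl (fun d r => d.insert r (d.getD r 0 + 1))
    (PySem.Dict.empty : PySem.Dict String Int) with hcounts
  have hkeys : counts.keys = PySem.Set.ofList rs := by
    rw [hcounts, PySem.Dict.keys_foldl_insert]
    simp [PySem.Dict.keys_empty]
    rfl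
  have hgetD : ∀ r, counts.getD r 0 = (rs.count r : Int) := by
    intro r
    rw [hcounts, PySem.Dict.getD_foldl_insert_add_one]
    simp
  -- the sorted roles list
  set S := PySem.List.sorted rs (fun r => r) false with hS
  have hSsorted : S.Pairwise (· ≤ ·) := PySem.List.sorted_pairwise rs (fun r => r)
  obtain ⟨hrle, hlt⟩ := pvKey S hSsorted
  have hperm : (PySem.Set.ofList S).Perm (PySem.Set.ofList rs) := by
    rw [List.perm_ext_iff_of_nodup (PySem.Set.nodup_ofList S) (PySem.Set.nodup_ofList rs)]
    intro a
    rw [PySem.Set.mem_ofList, PySem.Set.mem_ofList, hS, PySem.List.mem_sorted]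
  have hof : PySem.List.sorted (PySem.Set.ofList rs) (fun r => r) false = PySem.Set.ofList S :=
    PySem.List.sorted_eq_of_perm_of_pairwise_lt _ _ (fun r => r) hperm hlt
  have hcount : ∀ r, S.count r = rs.count r := fun r =>
    (PySem.List.sorted_perm rs (fun r => r) false).count_eq r
  by_cases hm : rs = []
  · have hce : counts = PySem.Dict.empty := by rw [hcounts, hm]; rfl
    have hS' : S = [] := by rw [hS, hm]; rfl
    rw [hce, hS']
    simp [pvRle, PySem.Dict.size_empty]
  · have hS0 : S ≠ [] := by
      rw [hS]; intro hc; exact hm (by simpa using (PySem.List.sorted_eq_nil_iff ..).1 hc)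
    have hsize : counts.size ≠ 0 := by
      have : counts.size = counts.keys.length := by simp [PySem.Dict.size, PySem.Dict.keys]
      rw [this, hkeys]
      intro hc
      rcases List.exists_mem_of_ne_nil rs hm with ⟨a, ha⟩
      have := (PySem.Set.mem_ofList rs a).2 ha
      rw [List.length_eq_zero_iff.1 hc] at this
      simp at this
    have hparts : (pvRle S).map (fun p => p.1 ++ ":" ++ PySem.Int.toStr (p.2 : Int)) ≠ [] := by
      obtain ⟨y, t, hyt⟩ := List.exists_cons_of_ne_nil hS0
      rw [hyt]; simp [pvRle]
    rw [if_pos hsize, if_pos hparts, hkeys, hof, hrle, List.map_map]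
    congr 1
    apply List.map_congr_left
    intro r _
    simp [hgetD r, hcount r]

-- ===== VERDICT (by name: the statement is the Claim_ definition above) =====
theorem role_summary_py_spec : Claim_equal_role_summary_py := by
  unfold Claim_equal_role_summary_py Spec_role_summary_py
  intro messages _
  exact main_eq messages
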